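-- pv_equiv track=rewrite | github.com/IkarosKurtz/Loomer | src/loomer/libs/chain_code_translators.py | convertirF4to3OT
-- ===== SOURCE A (Python) =====
-- def convertirF4to3OT(f4_code):
--   n = len(f4_code)
--   if n < 2:
--     raise ValueError("El código F4 debe tener al menos 2 elementos.")
--
--   c3ot = []
--
--   ref = f4_code[0]
--   support = f4_code[0]
--   primer_cambio_detectado = False
--
--   for i in range(1, n):
--     change = f4_code[i]
--
--     if change == support:
--       c3ot.append(0)
--     else:
--       # Detectamos el primer cambio real
--       if not primer_cambio_detectado:
--         c3ot.append(2)
--         primer_cambio_detectado = True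
--       elif change == ref:
--         c3ot.append(1)
--         ref = support
--       elif (change - ref) % 4 == 2:
--         c3ot.append(2)
--         ref = support
--       else:
--         c3ot.append(1)
--         ref = support
--
--     support = change
--
--   # Agregamos la última transición circular (con respecto al primero)
--   change = f4_code[0]
--   if change == support:
--     c3ot.append(0)
--   elif not primer_cambio_detectado:
--     c3ot.append(2)
--   elif change == ref:
--     c3ot.append(1)
--   elif (change - ref) % 4 == 2:
--     c3ot.append(2)
--   else:
--     c3ot.append(1)
--
--   return c3ot
-- ===== SOURCE B (Python) =====
-- def convertirF4to3OT(f4_code):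
--   n = len(f4_code)
--   if n < 2:
--     raise ValueError("El código F4 debe tener al menos 2 elementos.")
--
--   # Stage 1: close the cycle and list the positions i (1..n) where the
--   # circular sequence changes value.
--   ext = f4_code + [f4_code[0]]
--   changes = [i for i in range(1, n + 1) if ext[i] != ext[i - 1]]
--
--   # Stage 2: every non-change transition is 0; the first change is 2; each
--   # later change at j is compared against the value just before the previous
--   # change (which is exactly the 'ref' A maintains, since all values before
--   # the first change equal f4_code[0]).
--   out = [0] * n
--   if changes:
--     out[changes[0] - 1] = 2
--     for prev, j in zip(changes, changes[1:]):
--       ref = ext[prev - 1]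
--       out[j - 1] = 2 if (ext[j] - ref) % 4 == 2 else 1
--   return out
-- ===== Notes on version B (the rewrite author's own statement) =====
-- stated objective: alternative
-- what changed: Replaces A's sequential state machine (ref/support/flag updated element by element, plus a duplicated post-loop branch ladder) by a two-stage sparse algorithm: stage 1 lists the circular change positions, stage 2 fills a zero array only at those positions, pairing each change with its predecessor via zip and comparing against the value just before the previous change.
import Mathlib
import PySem

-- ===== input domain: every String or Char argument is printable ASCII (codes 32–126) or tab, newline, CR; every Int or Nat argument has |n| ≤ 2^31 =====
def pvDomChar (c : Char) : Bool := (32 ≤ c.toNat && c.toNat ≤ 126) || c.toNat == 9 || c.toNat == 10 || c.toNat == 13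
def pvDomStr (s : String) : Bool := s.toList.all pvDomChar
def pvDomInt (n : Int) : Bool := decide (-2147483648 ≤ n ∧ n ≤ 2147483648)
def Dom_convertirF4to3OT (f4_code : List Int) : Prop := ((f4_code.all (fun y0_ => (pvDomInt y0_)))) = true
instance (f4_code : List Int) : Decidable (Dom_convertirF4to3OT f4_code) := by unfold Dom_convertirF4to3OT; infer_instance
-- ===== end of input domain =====

-- B replaces A's sequential state machine (ref/support/flag mutated per step) by a
-- two-stage sparse algorithm: stage 1 lists the circular change positions, stage 2
-- fills a zero array only at those positions, pairing each change with its
-- predecessor via zip; objective: alternative algorithm, same O(n) cost.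

-- ===== PORT A =====
-- A's loop state: (c3ot, ref, support, primer_cambio_detectado)
def convertirF4to3OT (f4_code : List Int) : List Int :=
  let n : Int := f4_code.length
  if n < 2 then []  -- Python raises ValueError here; excluded by Pre_
  else
    let first := PySem.List.pyGetD f4_code 0 0
    let st := (PySem.List.pyRange 1 n 1).foldl
      (fun (st : List Int × Int × Int × Bool) i =>
        let (c3ot, ref, support, flag) := st
        let change := PySem.List.pyGetD f4_code i 0
        if change = support then (c3ot ++ [0], ref, change, flag)
        else if flag = false then (c3ot ++ [2], ref, change, true)
        else if change = ref then (c3ot ++ [1], support, change, flag)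
        else if PySem.Int.mod (change - ref) 4 = 2 then (c3ot ++ [2], support, change, flag)
        else (c3ot ++ [1], support, change, flag))
      ([], first, first, false)
    let (c3ot, ref, support, flag) := st
    let change := first
    if change = support then c3ot ++ [0]
    else if flag = false then c3ot ++ [2]
    else if change = ref then c3ot ++ [1]
    else if PySem.Int.mod (change - ref) 4 = 2 then c3ot ++ [2]
    else c3ot ++ [1]

-- ===== PORT B =====
-- Source B's 'ext = f4_code + [f4_code[0]]'
def pvExt (f4_code : List Int) : List Int :=
  f4_code ++ [PySem.List.pyGetD f4_code 0 0]

-- Source B's 'changes = [i for i in range(1, n+1) if ext[i] != ext[i-1]]'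
def pvChanges (f4_code : List Int) : List Int :=
  (PySem.List.pyRange 1 ((f4_code.length : Int) + 1) 1).filter
    (fun i => PySem.List.pyGetD (pvExt f4_code) i 0 ≠ PySem.List.pyGetD (pvExt f4_code) (i - 1) 0)

def convertirF4to3OT_alt (f4_code : List Int) : List Int :=
  let n : Int := f4_code.length
  if n < 2 then []  -- Python raises ValueError here; excluded by Pre_
  else
    let ext := pvExt f4_code
    let out := PySem.List.pyRepeat [(0 : Int)] n   -- [0] * n
    match pvChanges f4_code with                   -- 'if changes:'
    | [] => out
    | c0 :: rest =>
      let out := PySem.List.pySetD out (c0 - 1) 2  -- out[changes[0]-1] = 2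
      (List.zip (c0 :: rest) rest).foldl           -- for prev, j in zip(changes, changes[1:])
        (fun out p =>
          let ref := PySem.List.pyGetD ext (p.1 - 1) 0
          PySem.List.pySetD out (p.2 - 1)
            (if PySem.Int.mod (PySem.List.pyGetD ext p.2 0 - ref) 4 = 2 then 2 else 1))
        out

-- ===== PRECONDITION & SPEC =====
-- Pre_ excludes lists with fewer than 2 elements, on which A raises ValueError (B raises too).
def Pre_convertirF4to3OT (f4_code : List Int) : Prop := 2 ≤ f4_code.length
instance (f4_code : List Int) : Decidable (Pre_convertirF4to3OT f4_code) := by unfold Pre_convertirF4to3OT; infer_instance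
def pvWitness_convertirF4to3OT : List Int := [0, 1, 1, 3]

def Spec_convertirF4to3OT (f4_code : List Int) (out : List Int) : Prop := out = convertirF4to3OT_alt f4_code
instance (f4_code : List Int) (out : List Int) : Decidable (Spec_convertirF4to3OT f4_code out) := by unfold Spec_convertirF4to3OT; infer_instance

-- ===== CLAIM (what is proved, stated in full; the proofs are below) =====
def Claim_equal_convertirF4to3OT : Prop := ∀ (f4_code : List Int), Dom_convertirF4to3OT f4_code → Pre_convertirF4to3OT f4_code → Spec_convertirF4to3OT f4_code (convertirF4to3OT f4_code)

-- ===== LEMMAS AND PROOFS =====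

def pvSym (E : List Int) (i : Int) : Int :=
  if PySem.List.pyGetD E i 0 = PySem.List.pyGetD E (i - 1) 0 then 0
  else
    match ((PySem.List.pyRange 1 i 1).filter
        (fun j => PySem.List.pyGetD E j 0 ≠ PySem.List.pyGetD E (j - 1) 0)).getLast? with
    | none => 2
    | some p =>
      if PySem.Int.mod (PySem.List.pyGetD E i 0 - PySem.List.pyGetD E (p - 1) 0) 4 = 2 then 2
      else 1
def pvBodyE (E : List Int) (st : List Int × Int × Int × Bool) (i : Int) :
    List Int × Int × Int × Bool :=
  let (c3ot, ref, support, flag) := st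
  let change := PySem.List.pyGetD E i 0
  if change = support then (c3ot ++ [0], ref, change, flag)
  else if flag = false then (c3ot ++ [2], ref, change, true)
  else if change = ref then (c3ot ++ [1], support, change, flag)
  else if PySem.Int.mod (change - ref) 4 = 2 then (c3ot ++ [2], support, change, flag)
  else (c3ot ++ [1], support, change, flag)
def pvCpre (E : List Int) (k : Int) : List Int :=
  (PySem.List.pyRange 1 (k + 1) 1).filter
    (fun j => PySem.List.pyGetD E j 0 ≠ PySem.List.pyGetD E (j - 1) 0)


lemma pv_e_lt (f4 : List Int) (i : Int) (h0 : 0 ≤ i) (h1 : i < (f4.length : Int)) :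
    PySem.List.pyGetD (pvExt f4) i 0 = PySem.List.pyGetD f4 i 0 := by
  have hl : (pvExt f4).length = f4.length + 1 := by simp [pvExt]
  rw [PySem.List.pyGetD_eq_getElem _ _ h0 (by simp [hl]; omega),
      PySem.List.pyGetD_eq_getElem _ _ h0 (by exact_mod_cast h1)]
  exact List.getElem_append_left _

lemma pv_e_len (f4 : List Int) :
    PySem.List.pyGetD (pvExt f4) (f4.length : Int) 0 = PySem.List.pyGetD f4 0 0 := by
  rw [PySem.List.pyGetD_natCast]
  simp [pvExt]

lemma pv_A_runE (f4 : List Int) (h2 : 2 ≤ f4.length) :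
    convertirF4to3OT f4 =
      ((PySem.List.pyRange 1 ((f4.length : Int) + 1) 1).foldl (pvBodyE (pvExt f4))
        ([], PySem.List.pyGetD f4 0 0, PySem.List.pyGetD f4 0 0, false)).1 := by
  have h2' : (2 : Int) ≤ (f4.length : Int) := by exact_mod_cast h2
  unfold convertirF4to3OT
  simp only [if_neg (by omega : ¬ ((f4.length : Int) < 2))]
  rw [show PySem.List.pyRange 1 ((f4.length : Int) + 1) 1
      = PySem.List.pyRange 1 (f4.length : Int) 1 ++ [(f4.length : Int)] from
    PySem.List.pyRange_one_succ_right (by omega)]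
  rw [List.foldl_append]
  have hcongr : (PySem.List.pyRange 1 (f4.length : Int) 1).foldl
      (fun (st : List Int × Int × Int × Bool) i =>
        let (c3ot, ref, support, flag) := st
        let change := PySem.List.pyGetD f4 i 0
        if change = support then (c3ot ++ [0], ref, change, flag)
        else if flag = false then (c3ot ++ [2], ref, change, true)
        else if change = ref then (c3ot ++ [1], support, change, flag)
        else if PySem.Int.mod (change - ref) 4 = 2 then (c3ot ++ [2], support, change, flag)
        else (c3ot ++ [1], support, change, flag))
      ([], PySem.List.pyGetD f4 0 0, PySem.List.pyGetD f4 0 0, false)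
      = (PySem.List.pyRange 1 (f4.length : Int) 1).foldl (pvBodyE (pvExt f4))
      ([], PySem.List.pyGetD f4 0 0, PySem.List.pyGetD f4 0 0, false) := by
    apply PySem.List.foldl_congr_mem
    intro acc x hx
    have hb := PySem.List.mem_pyRange_one.mp hx
    obtain ⟨c3ot, ref, support, flag⟩ := acc
    simp only [pvBodyE, pv_e_lt f4 x (by omega) hb.2]
  rw [hcongr]
  set st := (PySem.List.pyRange 1 (f4.length : Int) 1).foldl (pvBodyE (pvExt f4))
      ([], PySem.List.pyGetD f4 0 0, PySem.List.pyGetD f4 0 0, false) with hst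
  obtain ⟨c3ot, ref, support, flag⟩ := st
  simp only [List.foldl_cons, List.foldl_nil, pvBodyE, pv_e_len f4]
  split_ifs <;> simp_all


lemma pv_e_zero (f4 : List Int) (h2 : 2 ≤ f4.length) :
    PySem.List.pyGetD (pvExt f4) 0 0 = PySem.List.pyGetD f4 0 0 := by
  have hl : (pvExt f4).length = f4.length + 1 := by simp [pvExt]
  rw [PySem.List.pyGetD_eq_getElem _ _ le_rfl (by simp [hl]),
      PySem.List.pyGetD_eq_getElem _ _ le_rfl (by simp; omega)]
  exact List.getElem_append_left _

lemma pv_inv (f4 : List Int) (h2 : 2 ≤ f4.length) (m : Nat) (hm : m ≤ f4.length) :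
    ((PySem.List.pyRange 1 ((m : Int) + 1) 1).foldl (pvBodyE (pvExt f4))
        ([], PySem.List.pyGetD f4 0 0, PySem.List.pyGetD f4 0 0, false) =
      ((PySem.List.pyRange 1 ((m : Int) + 1) 1).map (pvSym (pvExt f4)),
       (match (pvCpre (pvExt f4) (m : Int)).getLast? with
        | none => PySem.List.pyGetD f4 0 0
        | some p => PySem.List.pyGetD (pvExt f4) (p - 1) 0),
       PySem.List.pyGetD (pvExt f4) (m : Int) 0,
       !(pvCpre (pvExt f4) (m : Int)).isEmpty))
    ∧ ((pvCpre (pvExt f4) (m : Int)).isEmpty = true →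
        PySem.List.pyGetD (pvExt f4) (m : Int) 0 = PySem.List.pyGetD f4 0 0) := by
  induction m with
  | zero =>
    have hr : PySem.List.pyRange 1 ((0:Nat) + 1) 1 = [] := by
      apply PySem.List.pyRange_one_eq_nil; norm_num
    have hc : pvCpre (pvExt f4) ((0:Nat) : Int) = [] := by
      unfold pvCpre; norm_num [hr]
    refine ⟨?_, fun _ => pv_e_zero f4 h2⟩
    simp only [hr, hc, List.foldl_nil, List.map_nil, List.isEmpty_nil, List.getLast?_nil]
    simp [pv_e_zero f4 h2]
  | succ m ih =>
    have hm' : m ≤ f4.length := by omega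
    obtain ⟨ih1, ih2⟩ := ih hm'
    set E := pvExt f4 with hE
    set first := PySem.List.pyGetD f4 0 0 with hfirst
    have hsub : ((m:Int) + 1 - 1) = (m:Int) := by omega
    have hc1 : (((m+1) : Nat) : Int) = (m:Int) + 1 := by push_cast; ring
    have hrange : PySem.List.pyRange 1 ((m:Int) + 1 + 1) 1
        = PySem.List.pyRange 1 ((m:Int) + 1) 1 ++ [(m:Int) + 1] :=
      PySem.List.pyRange_one_succ_right (by omega)
    have hsym : pvSym E ((m:Int) + 1) =
        (if PySem.List.pyGetD E ((m:Int) + 1) 0 = PySem.List.pyGetD E ((m:Int)) 0 then 0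
         else
           match (pvCpre E (m : Int)).getLast? with
           | none => 2
           | some p =>
             if PySem.Int.mod (PySem.List.pyGetD E ((m:Int) + 1) 0
                 - PySem.List.pyGetD E (p - 1) 0) 4 = 2
             then 2 else 1) := by
      unfold pvSym pvCpre
      simp only [hsub]
    rw [hc1, hrange]
    rw [List.foldl_append, List.map_append, ih1]
    simp only [List.foldl_cons, List.foldl_nil, List.map_cons, List.map_nil, hsym]
    by_cases hch : PySem.List.pyGetD E ((m:Int) + 1) 0 = PySem.List.pyGetD E ((m:Int)) 0
    · -- no change at m+1
      have hcpre0 : pvCpre E ((m:Int) + 1) = pvCpre E (m : Int) := by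
        unfold pvCpre
        rw [PySem.List.pyRange_one_succ_right (by omega : (1:Int) ≤ (m:Int) + 1),
          List.filter_append]
        simp [hsub, hch]
      refine ⟨?_, ?_⟩
      · simp only [pvBodyE]
        rw [if_pos hch, if_pos hch, hcpre0]
      · intro hemp
        rw [hcpre0] at hemp
        rw [hch]
        exact ih2 hemp
    · -- change at m+1
      have hcpre1 : pvCpre E ((m:Int) + 1) = pvCpre E (m : Int) ++ [(m:Int) + 1] := by
        unfold pvCpre
        rw [PySem.List.pyRange_one_succ_right (by omega : (1:Int) ≤ (m:Int) + 1),
          List.filter_append]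
        have hch' : ¬ PySem.List.pyGetD E ((m:Int) + 1) 0 = E[m]?.getD 0 := by simpa using hch
        simp [hsub, hch']
      have hlast : (pvCpre E ((m:Int) + 1)).getLast? = some ((m:Int) + 1) := by
        rw [hcpre1]; simp
      have hie : (pvCpre E ((m:Int) + 1)).isEmpty = false := by rw [hcpre1]; simp
      refine ⟨?_, ?_⟩
      · simp only [pvBodyE, hlast, hie, Bool.not_false, hsub]
        rw [if_neg hch, if_neg hch]
        cases hq : (pvCpre E (m : Int)).getLast? with
        | none =>
          have hempty : pvCpre E (m : Int) = [] := by
            cases h : pvCpre E (m:Int) with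
            | nil => rfl
            | cons a l => rw [h] at hq; simp at hq
          have hflag : (pvCpre E (m:Int)).isEmpty = true := by rw [hempty]; rfl
          have hsupp : PySem.List.pyGetD E ((m:Int)) 0 = first := ih2 hflag
          simp only [hflag, Bool.not_true]
          rw [if_pos trivial, hsupp]
        | some p =>
          have hflag : (pvCpre E (m:Int)).isEmpty = false := by
            cases h : pvCpre E (m:Int) with
            | nil => rw [h] at hq; simp at hq
            | cons a l => rfl
          simp only [hflag, Bool.not_false]
          rw [if_neg (by simp)]
          by_cases hr : PySem.List.pyGetD E ((m:Int) + 1) 0 = PySem.List.pyGetD E (p - 1) 0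
          · have hmod0 : PySem.Int.mod (PySem.List.pyGetD E ((m:Int) + 1) 0
                - PySem.List.pyGetD E (p - 1) 0) 4 = 0 := by
              rw [hr, sub_self]; decide
            rw [if_pos hr, hmod0]
            norm_num
          · rw [if_neg hr]
            by_cases hmod : PySem.Int.mod (PySem.List.pyGetD E ((m:Int) + 1) 0
                - PySem.List.pyGetD E (p - 1) 0) 4 = 2
            · rw [if_pos hmod, if_pos hmod]
            · rw [if_neg hmod, if_neg hmod]
      · intro hemp
        rw [hcpre1] at hemp
        simp at hemp


lemma pv_A_eq_map (f4 : List Int) (h2 : 2 ≤ f4.length) :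
    convertirF4to3OT f4 =
      (PySem.List.pyRange 1 ((f4.length : Int) + 1) 1).map (pvSym (pvExt f4)) := by
  rw [pv_A_runE f4 h2, (pv_inv f4 h2 f4.length le_rfl).1]

lemma pv_fold_len (g : Int × Int → Int) (ps : List (Int × Int)) (base : List Int) :
    (ps.foldl (fun out p => PySem.List.pySetD out (p.2 - 1) (g p)) base).length
      = base.length := by
  induction ps generalizing base with
  | nil => rfl
  | cons p ps ih =>
    rw [List.foldl_cons, ih]
    exact PySem.List.length_pySetD _ _ _

lemma pv_fold_get_none (g : Int × Int → Int) (ps : List (Int × Int)) (base : List Int)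
    (j : Nat) (hpos : ∀ p ∈ ps, 1 ≤ p.2) (hne : ∀ p ∈ ps, p.2 - 1 ≠ (j : Int)) :
    PySem.List.pyGetD (ps.foldl (fun out p => PySem.List.pySetD out (p.2 - 1) (g p)) base)
        (j : Int) 0
      = PySem.List.pyGetD base (j : Int) 0 := by
  induction ps generalizing base with
  | nil => rfl
  | cons p ps ih =>
    rw [List.foldl_cons, ih _ (fun q hq => hpos q (List.mem_cons_of_mem _ hq))
      (fun q hq => hne q (List.mem_cons_of_mem _ hq))]
    have h1 : (1:Int) ≤ p.2 := hpos p List.mem_cons_self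
    have hcast : p.2 - 1 = (((p.2 - 1).toNat : Nat) : Int) := by omega
    rw [hcast, PySem.List.pySetD_natCast, PySem.List.pyGetD_natCast, PySem.List.pyGetD_natCast]
    have hInt : p.2 - 1 ≠ (j : Int) := hne p List.mem_cons_self
    have hjne : p.2.toNat - 1 ≠ j := by omega
    simp [List.getD, List.getElem?_set_ne hjne]

lemma pv_fold_get_last (g : Int × Int → Int) (u v : List (Int × Int)) (p : Int × Int)
    (base : List Int) (j : Nat) (hp : p.2 - 1 = (j : Int)) (hjr : j < base.length)
    (hpos : ∀ q ∈ v, 1 ≤ q.2) (hne : ∀ q ∈ v, q.2 - 1 ≠ (j : Int)) :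
    PySem.List.pyGetD
        ((u ++ p :: v).foldl (fun out q => PySem.List.pySetD out (q.2 - 1) (g q)) base)
        (j : Int) 0
      = g p := by
  rw [List.foldl_append, List.foldl_cons]
  rw [pv_fold_get_none g v _ j hpos hne]
  have hlen : (u.foldl (fun out q => PySem.List.pySetD out (q.2 - 1) (g q)) base).length
      = base.length := pv_fold_len g u base
  rw [hp, PySem.List.pySetD_natCast, PySem.List.pyGetD_natCast]
  have : j < (u.foldl (fun out q => PySem.List.pySetD out (q.2 - 1) (g q)) base).length := by
    rw [hlen]; exact hjr
  simp [List.getD, this]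

lemma pv_zip_append (A : List Int) (x : Int) (B : List Int) (hA : A ≠ []) :
    List.zip (A ++ x :: B) (A ++ x :: B).tail =
      List.zip A A.tail ++ (A.getLast hA, x) :: List.zip (x :: B) B := by
  induction A with
  | nil => exact absurd rfl hA
  | cons a A ih =>
    cases A with
    | nil => simp [List.zip]
    | cons b A' =>
      have h := ih (by simp)
      simp only [List.cons_append, List.tail_cons] at h ⊢
      simp only [List.zip_cons_cons]
      rw [h]
      simp [List.getLast]

lemma pv_mem_changes (f4 : List Int) (c : Int) (hc : c ∈ pvChanges f4) :
    1 ≤ c ∧ c ≤ (f4.length : Int) ∧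
      PySem.List.pyGetD (pvExt f4) c 0 ≠ PySem.List.pyGetD (pvExt f4) (c - 1) 0 := by
  unfold pvChanges at hc
  rw [List.mem_filter] at hc
  obtain ⟨hmem, hpred⟩ := hc
  have hb := PySem.List.mem_pyRange_one.mp hmem
  refine ⟨hb.1, by omega, by simpa using hpred⟩

lemma pv_changes_split (f4 : List Int) (i : Int) (h1 : 1 ≤ i) (h2 : i ≤ (f4.length : Int))
    (hc : PySem.List.pyGetD (pvExt f4) i 0 ≠ PySem.List.pyGetD (pvExt f4) (i - 1) 0) :
    pvChanges f4 = pvCpre (pvExt f4) (i - 1) ++ i ::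
      (PySem.List.pyRange (i + 1) ((f4.length : Int) + 1) 1).filter
        (fun j => PySem.List.pyGetD (pvExt f4) j 0 ≠ PySem.List.pyGetD (pvExt f4) (j - 1) 0) := by
  unfold pvChanges pvCpre
  rw [PySem.List.pyRange_one_append 1 i ((f4.length : Int) + 1) h1 (by omega),
    List.filter_append,
    PySem.List.pyRange_one_cons (by omega : i < (f4.length : Int) + 1)]
  rw [show i - 1 + 1 = i from by omega]
  congr 1
  rw [List.filter_cons]
  simp [hc]


lemma pv_B_eq_map (f4 : List Int) (h2 : 2 ≤ f4.length) :
    convertirF4to3OT_alt f4 =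
      (PySem.List.pyRange 1 ((f4.length : Int) + 1) 1).map (pvSym (pvExt f4)) := by
  have h2' : (2 : Int) ≤ (f4.length : Int) := by exact_mod_cast h2
  set E := pvExt f4 with hE
  unfold convertirF4to3OT_alt
  simp only [if_neg (by omega : ¬ ((f4.length : Int) < 2))]
  have hbase0 : PySem.List.pyRepeat [(0:Int)] (f4.length : Int) = List.replicate f4.length (0:Int) := by
    rw [PySem.List.pyRepeat_singleton, Int.toNat_natCast]
  cases hC : pvChanges f4 with
  | nil =>
    -- no change anywhere: all symbols are 0
    have hzero : ∀ i ∈ PySem.List.pyRange 1 ((f4.length : Int) + 1) 1, pvSym E i = (0:Int) := by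
      intro i hi
      by_cases hch : PySem.List.pyGetD E i 0 = PySem.List.pyGetD E (i - 1) 0
      · unfold pvSym; rw [if_pos hch]
      · exfalso
        have : i ∈ pvChanges f4 := by
          unfold pvChanges
          exact List.mem_filter.mpr ⟨hi, by simpa using hch⟩
        rw [hC] at this
        simp at this
    have hlr : (((f4.length : Int) + 1 - 1)).toNat = f4.length := by omega
    rw [List.map_congr_left hzero, hbase0, List.map_const', PySem.List.length_pyRange_one, hlr]
  | cons c0 rest =>
    -- at least one change: the writes hit exactly the change positions
    have hsubC : ∀ c, c ∈ rest → c ∈ pvChanges f4 := by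
      intro c hc; rw [hC]; exact List.mem_cons_of_mem _ hc
    have hc0 := pv_mem_changes f4 c0 (by rw [hC]; exact List.mem_cons_self)
    show (List.zip (c0 :: rest) rest).foldl
        (fun out p => PySem.List.pySetD out (p.2 - 1)
          (if PySem.Int.mod (PySem.List.pyGetD E p.2 0 - PySem.List.pyGetD E (p.1 - 1) 0) 4 = 2
           then (2:Int) else 1))
        (PySem.List.pySetD (PySem.List.pyRepeat [(0:Int)] (f4.length : Int)) (c0 - 1) 2)
      = (PySem.List.pyRange 1 ((f4.length : Int) + 1) 1).map (pvSym E)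
    set g : Int × Int → Int := fun p =>
      if PySem.Int.mod (PySem.List.pyGetD E p.2 0 - PySem.List.pyGetD E (p.1 - 1) 0) 4 = 2
      then (2:Int) else 1 with hg
    set base1 : List Int := PySem.List.pySetD (PySem.List.pyRepeat [(0:Int)] (f4.length : Int)) (c0 - 1) 2
      with hbase1
    have hlenb1 : base1.length = f4.length := by
      rw [hbase1, PySem.List.length_pySetD, hbase0, List.length_replicate]
    have hlen : ((List.zip (c0 :: rest) rest).foldl
        (fun out p => PySem.List.pySetD out (p.2 - 1) (g p)) base1).length
        = f4.length := by
      rw [pv_fold_len, hlenb1]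
    apply List.ext_getElem
    · rw [hlen, List.length_map, PySem.List.length_pyRange_one]; omega
    intro j hj1 hj2
    rw [hlen] at hj1
    have hgoalL : ((List.zip (c0 :: rest) rest).foldl
        (fun out p => PySem.List.pySetD out (p.2 - 1) (g p)) base1)[j]'(by rw [hlen]; exact hj1)
        = PySem.List.pyGetD ((List.zip (c0 :: rest) rest).foldl
            (fun out p => PySem.List.pySetD out (p.2 - 1) (g p)) base1) (j : Int) 0 := by
      rw [PySem.List.pyGetD_natCast, List.getD_eq_getElem]
    have hgoalR : ((PySem.List.pyRange 1 ((f4.length : Int) + 1) 1).map (pvSym E))[j]'hj2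
        = pvSym E (1 + (j : Int)) := by
      rw [← PySem.List.pyGetD_map_pyRange_one (pvSym E) 1 ((f4.length : Int) + 1) j 0 (by omega)]
      rw [PySem.List.pyGetD_natCast, List.getD_eq_getElem]
    rw [hgoalL, hgoalR]
    have hjn : (j : Int) < (f4.length : Int) := by omega
    have him : (1 + (j : Int)) - 1 = (j : Int) := by omega
    by_cases hch : PySem.List.pyGetD E (1 + (j : Int)) 0
        = PySem.List.pyGetD E ((1 + (j : Int)) - 1) 0
    · -- no change at position 1+j: untouched cell, symbol 0
      have hne : ∀ p ∈ List.zip (c0 :: rest) rest, p.2 - 1 ≠ (j : Int) := by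
        rintro ⟨a, b⟩ hp heq
        have hb : b ∈ rest := (List.of_mem_zip hp).2
        have hmc := pv_mem_changes f4 b (hsubC b hb)
        have hb2 : b = 1 + (j : Int) := by simpa using by omega
        rw [hb2] at hmc
        exact hmc.2.2 hch
      have hpos : ∀ p ∈ List.zip (c0 :: rest) rest, 1 ≤ p.2 := by
        rintro ⟨a, b⟩ hp
        exact (pv_mem_changes f4 b (hsubC b (List.of_mem_zip hp).2)).1
      rw [pv_fold_get_none g _ _ j hpos hne]
      have hc0ne : c0 ≠ 1 + (j : Int) := by
        intro h
        rw [h] at hc0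
        exact hc0.2.2 hch
      rw [hbase1, show c0 - 1 = (((c0 - 1).toNat : Nat) : Int) from by omega,
        PySem.List.pySetD_natCast, PySem.List.pyGetD_natCast, hbase0]
      have htne : (c0 - 1).toNat ≠ j := by omega
      have hsym0 : pvSym E (1 + (j : Int)) = 0 := by unfold pvSym; rw [if_pos hch]
      rw [hsym0]
      have htne' : c0.toNat - 1 ≠ j := by omega
      simp [htne', hj1, List.getElem_replicate]
    · -- change at position 1+j
      have hi1 : 1 ≤ 1 + (j : Int) := by omega
      have hin : 1 + (j : Int) ≤ (f4.length : Int) := by omega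
      have hsplit := pv_changes_split f4 (1 + (j : Int)) hi1 hin hch
      set T : List Int := (PySem.List.pyRange ((1 + (j : Int)) + 1) ((f4.length : Int) + 1) 1).filter
        (fun k => PySem.List.pyGetD E k 0 ≠ PySem.List.pyGetD E (k - 1) 0) with hT
      set Q : List Int := pvCpre E ((1 + (j : Int)) - 1) with hQdef
      have hCeq : c0 :: rest = Q ++ (1 + (j : Int)) :: T := by rw [← hC, hsplit]
      have hQeq : Q = (PySem.List.pyRange 1 (1 + (j : Int)) 1).filter
          (fun k => PySem.List.pyGetD E k 0 ≠ PySem.List.pyGetD E (k - 1) 0) := by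
        rw [hQdef]; unfold pvCpre
        rw [show (1 + (j : Int)) - 1 + 1 = 1 + (j : Int) from by omega]
      have hTgt : ∀ c ∈ T, 1 + (j : Int) < c := by
        intro c hcT
        rw [hT] at hcT
        have := (PySem.List.mem_pyRange_one.mp (List.mem_filter.mp hcT).1).1
        omega
      have hsym : pvSym E (1 + (j : Int)) =
          (match Q.getLast? with
           | none => 2
           | some p =>
             if PySem.Int.mod (PySem.List.pyGetD E (1 + (j : Int)) 0
                 - PySem.List.pyGetD E (p - 1) 0) 4 = 2 then 2 else 1) := by
        unfold pvSym
        rw [if_neg hch, ← hQeq]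
      cases hQ : Q with
      | nil =>
        have hc0j : c0 = 1 + (j : Int) := by
          rw [hQ] at hCeq; simpa using (List.cons_eq_cons.mp hCeq).1
        have hrT : rest = T := by
          rw [hQ] at hCeq; simpa using (List.cons_eq_cons.mp hCeq).2
        have hne : ∀ p ∈ List.zip (c0 :: rest) rest, p.2 - 1 ≠ (j : Int) := by
          rintro ⟨a, b⟩ hp heq
          have hb : b ∈ rest := (List.of_mem_zip hp).2
          rw [hrT] at hb
          have := hTgt b hb
          omega
        have hpos : ∀ p ∈ List.zip (c0 :: rest) rest, 1 ≤ p.2 := by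
          rintro ⟨a, b⟩ hp
          exact (pv_mem_changes f4 b (hsubC b (List.of_mem_zip hp).2)).1
        rw [pv_fold_get_none g _ _ j hpos hne]
        rw [hsym, hQ]
        rw [hbase1, show c0 - 1 = (((j : Nat) : Nat) : Int) from by omega,
          PySem.List.pySetD_natCast, PySem.List.pyGetD_natCast, hbase0]
        simp [List.getD, hj1]
      | cons q0 qs =>
        have hQne : Q ≠ [] := by rw [hQ]; simp
        have hzip : List.zip (c0 :: rest) rest
            = List.zip Q Q.tail ++ (Q.getLast hQne, 1 + (j : Int)) ::
              List.zip ((1 + (j : Int)) :: T) T := by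
          rw [show List.zip (c0 :: rest) rest
              = List.zip (c0 :: rest) (c0 :: rest).tail from rfl]
          rw [show (c0 :: rest) = Q ++ (1 + (j : Int)) :: T from hCeq]
          exact pv_zip_append Q (1 + (j : Int)) T hQne
        have hpos : ∀ q ∈ List.zip ((1 + (j : Int)) :: T) T, 1 ≤ q.2 := by
          rintro ⟨a, b⟩ hp
          have := hTgt b (List.of_mem_zip hp).2
          omega
        have hne : ∀ q ∈ List.zip ((1 + (j : Int)) :: T) T, q.2 - 1 ≠ (j : Int) := by
          rintro ⟨a, b⟩ hp heq
          have := hTgt b (List.of_mem_zip hp).2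
          omega
        rw [hzip, pv_fold_get_last g _ _ _ _ j (by simp) (by rw [hlenb1]; exact hj1)
          hpos hne]
        rw [hsym, List.getLast?_eq_some_getLast hQne]

-- ===== VERDICT (by name: the statement is the Claim_ definition above) =====
theorem convertirF4to3OT_spec : Claim_equal_convertirF4to3OT := by
  intro f4 _ hpre
  unfold Spec_convertirF4to3OT
  rw [pv_A_eq_map f4 hpre, pv_B_eq_map f4 hpre]
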